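-- pv_equiv track=rewrite | github.com/christophertbrown/bioscripts | ctbBio/filter_fastq_sam.py | filter_paired
-- ===== SOURCE A (Python) =====
-- def filter_paired(list):
-- 	"""
-- 	require that both pairs are mapped in the sam file in order to remove the reads
-- 	"""
-- 	pairs = {}
-- 	filtered = []
-- 	for id in list:
-- 		read = id.rsplit('/')[0]
-- 		if read not in pairs:
-- 			pairs[read] = []
-- 		pairs[read].append(id)
-- 	for read in pairs:
-- 		ids = pairs[read]
-- 		if len(ids) == 2:
-- 			filtered.extend(ids)
-- 	return set(filtered)
-- ===== SOURCE B (Python) =====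
-- def filter_paired(list):
--     """
--     keep ids whose read prefix (before '/') occurs exactly twice
--     """
--     reads = [id.rsplit('/')[0] for id in list]
--     filtered = []
--     for read in dict.fromkeys(reads):
--         if reads.count(read) == 2:
--             filtered.extend(id for id, r in zip(list, reads) if r == read)
--     return set(filtered)
-- ===== Notes on version B (the rewrite author's own statement) =====
-- stated objective: alternative
-- what changed: Replaces the dict-of-id-buckets (group then iterate buckets) by a bucketless scheme: dedup the prefix list for the iteration order and, per distinct prefix, use reads.count to test 'exactly twice' and a zip filter over the original list to collect the ids.
import Mathlib
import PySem

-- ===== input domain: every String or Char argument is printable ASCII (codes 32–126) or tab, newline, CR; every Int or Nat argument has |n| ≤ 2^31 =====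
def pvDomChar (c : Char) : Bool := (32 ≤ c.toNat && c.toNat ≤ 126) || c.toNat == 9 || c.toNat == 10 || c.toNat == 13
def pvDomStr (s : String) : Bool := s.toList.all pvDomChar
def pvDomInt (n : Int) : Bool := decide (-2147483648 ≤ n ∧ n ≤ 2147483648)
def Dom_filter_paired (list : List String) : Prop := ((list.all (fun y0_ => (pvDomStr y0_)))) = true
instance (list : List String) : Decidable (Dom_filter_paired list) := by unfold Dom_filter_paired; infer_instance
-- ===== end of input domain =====

-- B drops the dict of id-buckets: it dedups the prefix list and, per distinct prefix, counts and collects ids directly from the input; alternative structure, not faster.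

-- ===== PORT A =====
-- id.rsplit('/')[0]: rsplit with no maxsplit = split('/'), which always yields a nonempty list, so [0] is its head (exact).
def pvRead (id : String) : String := ((PySem.Str.split? id "/").getD []).headD ""

def filter_paired (list : List String) : List String :=
  -- 'if read not in pairs: pairs[read] = []; pairs[read].append(id)' is d[read] = d.get(read, []) + [id], i.e. Dict.modify (exact)
  let pairs : PySem.Dict String (List String) :=
    list.foldl (fun d id => d.modify (pvRead id) [] (· ++ [id])) PySem.Dict.empty
  let filtered : List String :=
    pairs.keys.foldl (fun filtered read =>
      let ids := pairs.getD read []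
      if ids.length == 2 then filtered ++ ids else filtered) []
  PySem.Set.ofList filtered

-- ===== PORT B =====
def filter_paired_alt (list : List String) : List String :=
  let reads := list.map pvRead
  let filtered : List String :=
    (PySem.List.dedup reads).foldl (fun filtered read =>
      if reads.count read == 2 then
        filtered ++ ((list.zip reads).filter (fun p => p.2 == read)).map (·.1)
      else filtered) []
  PySem.Set.ofList filtered

-- ===== PRECONDITION & SPEC =====
def Spec_filter_paired (list : List String) (out : List String) : Prop := out = filter_paired_alt list
instance (list : List String) (out : List String) : Decidable (Spec_filter_paired list out) := by unfold Spec_filter_paired; infer_instance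

-- ===== CLAIM (what is proved, stated in full; the proofs are below) =====
def Claim_equal_filter_paired : Prop := ∀ (list : List String), Dom_filter_paired list → Spec_filter_paired list (filter_paired list)

-- ===== LEMMAS AND PROOFS =====

-- zip the list with its own map and filter on the mapped component = filter on the function
theorem pv_zip_filter (list : List String) (read : String) :
    ((list.zip (list.map pvRead)).filter (fun p => p.2 == read)).map (·.1)
      = list.filter (fun id => pvRead id == read) := by
  induction list with
  | nil => rfl
  | cons x xs ih =>
    simp only [List.map_cons, List.zip_cons_cons, List.filter_cons]
    by_cases h : pvRead x = read
    · simp [h, ih]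
    · simp [h, ih]

-- A's grouping fold, restated over (key, value) pairs
theorem pv_pairs_eq (list : List String) :
    list.foldl (fun (d : PySem.Dict String (List String)) id => d.modify (pvRead id) [] (· ++ [id])) PySem.Dict.empty
      = (list.map (fun id => (pvRead id, id))).foldl (fun d p => d.modify p.1 [] (· ++ [p.2])) PySem.Dict.empty := by
  rw [List.foldl_map]

theorem pv_pairs_getD (list : List String) (read : String) :
    (list.foldl (fun (d : PySem.Dict String (List String)) id => d.modify (pvRead id) [] (· ++ [id])) PySem.Dict.empty).getD read []
      = list.filter (fun id => pvRead id == read) := by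
  rw [pv_pairs_eq, PySem.Dict.getD_foldl_modify_append]
  simp [List.filter_map, Function.comp_def, List.map_map]

theorem pv_pairs_keys (list : List String) :
    (list.foldl (fun (d : PySem.Dict String (List String)) id => d.modify (pvRead id) [] (· ++ [id])) PySem.Dict.empty).keys
      = PySem.List.dedup (list.map pvRead) := by
  rw [PySem.Dict.keys_foldl_modify_key]
  simp [PySem.Set.update_nil_left]

theorem pv_count_eq (list : List String) (read : String) :
    (list.map pvRead).count read = (list.filter (fun id => pvRead id == read)).length := by
  simp [List.count, List.countP_eq_length_filter, List.filter_map, Function.comp_def]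

-- ===== VERDICT (by name: the statement is the Claim_ definition above) =====
theorem filter_paired_spec : Claim_equal_filter_paired := by
  intro list _
  unfold Spec_filter_paired filter_paired filter_paired_alt
  simp only [pv_pairs_keys, pv_pairs_getD, pv_count_eq, pv_zip_filter]
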